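-- pv_equiv track=rewrite | github.com/Permafacture/data-oriented-pyglet | numpy_ecs/global_allocator.py | verify_component_schema
-- ===== SOURCE A (Python) =====
-- def verify_component_schema(allocation_schema):
--     '''given an allocation schema as a list of lists, return True if the schema
--     keeps all Component arrays contiguous.  Else return False'''
--     started = [False] * len(allocation_schema[0])
--     ended   = [False] * len(allocation_schema[0])
--     for row in allocation_schema:
--         for i,val in enumerate(row):
--             if val:
--                if not started[i]:
--                   started[i] = True
--                else:
--                   if ended[i]:
--                     return False
--             elif started[i]:
--               ended[i] = True
--     return True
-- ===== SOURCE B (Python) =====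
-- def verify_component_schema(allocation_schema):
--     '''given an allocation schema as a list of lists, return True if the schema
--     keeps all Component arrays contiguous.  Else return False'''
--     width = len(allocation_schema[0])
--     for i in range(width):
--         started = False
--         ended = False
--         for row in allocation_schema:
--             if len(row) < i + 1:
--                 continue
--             val = row[i]
--             if val:
--                 if not started:
--                     started = True
--                 elif ended:
--                     return False
--             elif started:
--                 ended = True
--     return True
-- ===== Notes on version B (the rewrite author's own statement) =====
-- stated objective: alternative
-- what changed: Column-major scan with two local Boolean scalars per column instead of A's row-major sweep over started/ended state arrays.
-- outside the precondition, e.g. on verify_component_schema([[1], [0], [1, 5]]): A returns False, B returns False; on verify_component_schema([[1], [1, 1]]): A raises IndexError, B returns True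
import Mathlib
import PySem

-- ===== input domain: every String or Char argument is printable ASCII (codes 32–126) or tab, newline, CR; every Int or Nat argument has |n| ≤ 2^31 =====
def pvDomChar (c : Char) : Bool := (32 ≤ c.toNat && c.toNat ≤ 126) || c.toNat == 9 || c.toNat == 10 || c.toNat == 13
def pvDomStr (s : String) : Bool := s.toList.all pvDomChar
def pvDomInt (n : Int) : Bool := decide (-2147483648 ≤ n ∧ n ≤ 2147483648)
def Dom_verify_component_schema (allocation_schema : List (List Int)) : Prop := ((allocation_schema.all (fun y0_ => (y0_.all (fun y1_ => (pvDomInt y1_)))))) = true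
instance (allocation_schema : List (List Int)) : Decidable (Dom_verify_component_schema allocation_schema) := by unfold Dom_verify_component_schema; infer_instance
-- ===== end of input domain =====

-- B replaces A's row-major sweep over started/ended state arrays by a column-major
-- scan with two local Boolean scalars per column (alternative decomposition, same cost).


-- ===== PORT A =====
-- inner loop `for i,val in enumerate(row)`; `started[i]`/`ended[i]` are read with
-- getD (index in range for every input admitted by Pre_, where no IndexError occurs);
-- `none` models the early `return False`.
def innerA (started ended : List Bool) (i : Nat) : List Int → Option (List Bool × List Bool)
  | [] => some (started, ended)
  | val :: rest =>
    if val ≠ 0 then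
      if !(started.getD i false) then
        innerA (started.set i true) ended (i + 1) rest
      else if ended.getD i false then none
      else innerA started ended (i + 1) rest
    else if started.getD i false then
      innerA started (ended.set i true) (i + 1) rest
    else innerA started ended (i + 1) rest

def outerA (started ended : List Bool) : List (List Int) → Bool
  | [] => true
  | row :: rest =>
    match innerA started ended 0 row with
    | none => false
    | some (s', e') => outerA s' e' rest

def verify_component_schema (allocation_schema : List (List Int)) : Bool :=
  let n := (allocation_schema.headD []).length
  outerA (List.replicate n false) (List.replicate n false) allocation_schema

-- ===== PORT B =====
-- one column: walk the rows with two local scalars; rows shorter than i+1 are skipped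
def colRunB (i : Nat) (started ended : Bool) : List (List Int) → Bool
  | [] => true
  | row :: rest =>
    if row.length < i + 1 then colRunB i started ended rest
    else
      let val := row.getD i 0
      if val ≠ 0 then
        if !started then colRunB i true ended rest
        else if ended then false
        else colRunB i started ended rest
      else if started then colRunB i started true rest
      else colRunB i started ended rest

def verify_component_schema_alt (allocation_schema : List (List Int)) : Bool :=
  let width := (allocation_schema.headD []).length
  (List.range width).all (fun i => colRunB i false false allocation_schema)

-- ===== PRECONDITION & SPEC =====
-- Pre_ excludes the empty schema (A raises IndexError on allocation_schema[0]) and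
-- schemas containing a row longer than the first row: on those A reaches an
-- out-of-range started[i]/ended[i] and raises IndexError, unless an earlier cell
-- already violated contiguity, in which case A returns False (see cites).
def Pre_verify_component_schema (allocation_schema : List (List Int)) : Prop :=
  allocation_schema ≠ [] ∧
  ∀ row ∈ allocation_schema, row.length ≤ (allocation_schema.headD []).length
instance (allocation_schema : List (List Int)) : Decidable (Pre_verify_component_schema allocation_schema) := by unfold Pre_verify_component_schema; infer_instance
def pvWitness_verify_component_schema : List (List Int) := [[1, 0], [1, 1], [0, 1]]

def Spec_verify_component_schema (allocation_schema : List (List Int)) (out : Bool) : Prop := out = verify_component_schema_alt allocation_schema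
instance (allocation_schema : List (List Int)) (out : Bool) : Decidable (Spec_verify_component_schema allocation_schema out) := by unfold Spec_verify_component_schema; infer_instance

-- ===== CLAIM (what is proved, stated in full; the proofs are below) =====
def Claim_equal_verify_component_schema : Prop := ∀ (allocation_schema : List (List Int)), Dom_verify_component_schema allocation_schema → Pre_verify_component_schema allocation_schema → Spec_verify_component_schema allocation_schema (verify_component_schema allocation_schema)

-- ===== LEMMAS AND PROOFS =====

-- shifting the enumerate index by one corresponds to peeling the head column off the state
theorem innerA_shift (row : List Int) : ∀ (k : Nat) (sb eb : Bool) (s e : List Bool),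
    innerA (sb :: s) (eb :: e) (k + 1) row
      = (innerA s e k row).map (fun p => (sb :: p.1, eb :: p.2)) := by
  induction row with
  | nil => intro k sb eb s e; simp [innerA]
  | cons v vs ih =>
    intro k sb eb s e
    simp only [innerA, List.getD_cons_succ, List.set_cons_succ]
    split_ifs <;> simp [ih]

-- the head column's cell is processed first, then the rest of the row on the tail state
theorem innerA_head (v : Int) (vs : List Int) (sb eb : Bool) (s e : List Bool) :
    innerA (sb :: s) (eb :: e) 0 (v :: vs)
      = if v ≠ 0 ∧ sb = true ∧ eb = true then none
        else (innerA s e 0 vs).map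
          (fun p => ((sb || decide (v ≠ 0)) :: p.1, (eb || (decide (v = 0) && sb)) :: p.2)) := by
  by_cases hv : v = 0 <;> cases sb <;> cases eb <;>
    simp [innerA, hv, innerA_shift]

theorem innerA_nil_nil (row : List Int) : ∀ (k : Nat), innerA [] [] k row = some ([], []) := by
  induction row with
  | nil => intro k; simp [innerA]
  | cons v vs ih => intro k; simp [innerA, ih]

theorem outerA_nil_nil (rows : List (List Int)) : outerA [] [] rows = true := by
  induction rows with
  | nil => simp [outerA]
  | cons r rs ih => simp [outerA, innerA_nil_nil, ih]

-- column i+1 of the rows is column i of the beheaded rows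
theorem colRunB_shift (rows : List (List Int)) : ∀ (i : Nat) (st en : Bool),
    colRunB (i + 1) st en rows = colRunB i st en (rows.map List.tail) := by
  induction rows with
  | nil => intro i st en; simp [colRunB]
  | cons r rs ih =>
    intro i st en
    cases r with
    | nil => simp [colRunB, ih]
    | cons v vs =>
      by_cases h1 : vs.length < i + 1
      · have h2 : vs.length + 1 < i + 1 + 1 := by omega
        simp [colRunB, h1, h2, ih]
      · have h2 : ¬ (vs.length + 1 < i + 1 + 1) := by omega
        simp only [List.map_cons, List.tail_cons, colRunB, List.length_cons,
          List.getD_cons_succ, if_neg h1, if_neg h2]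
        split_ifs <;> simp [ih]

theorem colRunB_step (v : Int) (vs : List Int) (rest : List (List Int)) (sb eb : Bool) :
    colRunB 0 sb eb ((v :: vs) :: rest)
      = if v ≠ 0 ∧ sb = true ∧ eb = true then false
        else colRunB 0 (sb || decide (v ≠ 0)) (eb || (decide (v = 0) && sb)) rest := by
  by_cases hv : v = 0 <;> cases sb <;> cases eb <;> simp [colRunB, hv]

-- peel the head column: A's sweep equals the head-column scan && A's sweep on the tails
theorem outerA_decomp (rows : List (List Int)) : ∀ (sb eb : Bool) (s e : List Bool),
    outerA (sb :: s) (eb :: e) rows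
      = (colRunB 0 sb eb rows && outerA s e (rows.map List.tail)) := by
  induction rows with
  | nil => intro sb eb s e; simp [outerA, colRunB]
  | cons row rest ih =>
    intro sb eb s e
    cases row with
    | nil =>
      have : innerA (sb :: s) (eb :: e) 0 [] = some (sb :: s, eb :: e) := by simp [innerA]
      simp only [outerA, this, List.map_cons, List.tail_nil]
      rw [ih]
      have hc : colRunB 0 sb eb ([] :: rest) = colRunB 0 sb eb rest := by simp [colRunB]
      rw [hc]
      simp [innerA]
    | cons v vs =>
      rw [colRunB_step]
      by_cases hf : v ≠ 0 ∧ sb = true ∧ eb = true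
      · obtain ⟨hv, hsb, heb⟩ := hf
        subst hsb; subst heb
        simp [outerA, innerA_head, hv]
      · simp only [outerA, innerA_head, if_neg hf]
        cases hvs : innerA s e 0 vs with
        | none =>
          simp only [List.map_cons, List.tail_cons, outerA, hvs, Option.map_none,
            Bool.and_false]
        | some p =>
          obtain ⟨t1, t2⟩ := p
          simp only [List.map_cons, List.tail_cons, outerA, hvs, Option.map_some]
          exact ih _ _ _ _

theorem main_eq (n : Nat) : ∀ (rows : List (List Int)),
    outerA (List.replicate n false) (List.replicate n false) rows
      = (List.range n).all (fun i => colRunB i false false rows) := by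
  induction n with
  | zero => intro rows; simp [outerA_nil_nil]
  | succ m ih =>
    intro rows
    rw [List.replicate_succ, outerA_decomp, ih (rows.map List.tail),
      List.range_succ_eq_map]
    simp only [List.all_cons, List.all_map, Function.comp_def]
    congr 1
    have hfun : (fun i => colRunB i false false (List.map List.tail rows))
        = fun x => colRunB x.succ false false rows := by
      funext i
      rw [← colRunB_shift]
    rw [hfun]

-- ===== VERDICT (by name: the statement is the Claim_ definition above) =====
theorem verify_component_schema_spec : Claim_equal_verify_component_schema := by
  intro schema _ _
  unfold Spec_verify_component_schema verify_component_schema verify_component_schema_alt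
  exact main_eq _ schema
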